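-- pv_equiv track=rewrite | github.com/Francisco-autonomous/Soma_hipotenusa | soma_hipotenusa.py | soma_hipotenusas
-- ===== SOURCE A (Python) =====
-- def é_hipotenusa(n):
--     i = 1
--     j = 1
--     s = 0
--     while i < n:
--         while s != n ** 2 and s < n ** 2:
--             s = i ** 2 + j ** 2
--             j += 1
--         if s == n ** 2:
--             return True
--
--         i += 1
--         j = 1
--         s = 0
--     return False
--
-- def soma_hipotenusas(k):
--     h = 0
--     n = 1
--     while n <= k:
--         if é_hipotenusa(n) == True:
--             h = h + n
--         n += 1
--
--     return h
-- ===== SOURCE B (Python) =====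
-- def soma_hipotenusas(k):
--     squares = {j * j for j in range(1, k + 1)}
--     return sum(n for n in range(2, k + 1)
--                if any(n * n - i * i in squares for i in range(1, n)))
-- ===== Notes on version B (the rewrite author's own statement) =====
-- stated objective: faster
-- what changed: B replaces A's per-n brute-force search over all leg pairs (i,j) by a precomputed hash set of squares: n is a hypotenuse iff n*n - i*i lies in the set for some positive leg i below n, removing the inner j-scan entirely.
import Mathlib
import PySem

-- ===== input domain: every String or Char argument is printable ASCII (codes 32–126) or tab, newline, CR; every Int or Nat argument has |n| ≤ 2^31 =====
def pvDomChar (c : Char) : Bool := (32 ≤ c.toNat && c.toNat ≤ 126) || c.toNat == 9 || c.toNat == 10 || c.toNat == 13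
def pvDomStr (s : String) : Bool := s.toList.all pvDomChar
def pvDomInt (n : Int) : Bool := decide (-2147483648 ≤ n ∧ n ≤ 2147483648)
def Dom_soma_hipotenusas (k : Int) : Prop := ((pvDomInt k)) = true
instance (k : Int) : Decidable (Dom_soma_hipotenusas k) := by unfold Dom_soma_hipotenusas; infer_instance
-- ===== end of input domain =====

-- B replaces A's brute-force inner search over leg pairs by a precomputed set of squares (faster; asymptotic).

-- ===== PORT A =====
-- inner 'while s != n**2 and s < n**2' loop of é_hipotenusa; fuel is an upper
-- bound on the iteration count (proved sufficient below), the state (j, s) is A's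
def ehInner (n i : Int) : Int → Int → Nat → Int
  | _, s, 0 => s
  | j, s, f+1 => if s ≠ n * n ∧ s < n * n then ehInner n i (j+1) (i*i + j*j) f else s

-- outer 'while i < n' loop of é_hipotenusa
def ehOuter (n : Int) : Int → Nat → Bool
  | _, 0 => false
  | i, f+1 =>
    if i < n then
      if ehInner n i 1 0 (n.toNat + 2) = n * n then true
      else ehOuter n (i+1) f
    else false

def é_hipotenusa (n : Int) : Bool := ehOuter n 1 (n.toNat + 1)

-- 'while n <= k' loop of soma_hipotenusas
def somaLoop (k : Int) : Int → Int → Nat → Int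
  | _, h, 0 => h
  | n, h, f+1 => if n ≤ k then somaLoop k (n+1) (if é_hipotenusa n then h + n else h) f else h

def soma_hipotenusas (k : Int) : Int := somaLoop k 1 0 (k.toNat + 1)

-- ===== PORT B =====
-- squares = {j*j for j in range(1, k+1)}
def pvSquares (k : Int) : PySem.Set Int :=
  PySem.Set.ofList ((PySem.List.pyRange 1 (k+1) 1).map (fun j => j * j))

-- any(n*n - i*i in squares for i in range(1, n))
def pvIsHyp (k n : Int) : Bool :=
  (PySem.List.pyRange 1 n 1).any (fun i => PySem.Set.contains (pvSquares k) (n*n - i*i))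

def soma_hipotenusas_alt (k : Int) : Int :=
  ((PySem.List.pyRange 2 (k+1) 1).filter (fun n => pvIsHyp k n)).sum

-- ===== PRECONDITION & SPEC =====
def Spec_soma_hipotenusas (k : Int) (out : Int) : Prop := out = soma_hipotenusas_alt k
instance (k : Int) (out : Int) : Decidable (Spec_soma_hipotenusas k out) := by unfold Spec_soma_hipotenusas; infer_instance

-- ===== CLAIM (what is proved, stated in full; the proofs are below) =====
def Claim_equal_soma_hipotenusas : Prop := ∀ (k : Int), Dom_soma_hipotenusas k → Spec_soma_hipotenusas k (soma_hipotenusas k)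

-- ===== LEMMAS AND PROOFS =====

-- once the loop condition fails, the inner loop returns s unchanged
theorem ehInner_stop (n i j s : Int) (f : Nat) (h : ¬ (s ≠ n * n ∧ s < n * n)) :
    ehInner n i j s f = s := by
  cases f <;> simp [ehInner, h]

-- characterisation of the inner loop: it hits n² exactly when some j' ≥ j works
theorem ehInner_iff (n i : Int) (hn : 0 ≤ n) :
    ∀ (f : Nat) (j s : Int), 1 ≤ j → s < n * n → n + 1 - j ≤ (f : Int) →
      (ehInner n i j s f = n * n ↔ ∃ j', j ≤ j' ∧ i*i + j'*j' = n * n) := by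
  intro f
  induction f with
  | zero =>
    intro j s hj hs hf
    simp only [ehInner]
    constructor
    · intro h; omega
    · rintro ⟨j', hjj', heq⟩
      exfalso
      have hj' : n + 1 ≤ j' := by omega
      nlinarith
  | succ f ih =>
    intro j s hj hs hf
    have hcond : (s ≠ n * n ∧ s < n * n) := ⟨by omega, hs⟩
    simp only [ehInner, if_pos hcond]
    rcases lt_trichotomy (i*i + j*j) (n*n) with hlt | heq | hgt
    · rw [ih (j+1) (i*i + j*j) (by omega) hlt (by omega)]
      constructor
      · rintro ⟨j', h1, h2⟩; exact ⟨j', by omega, h2⟩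
      · rintro ⟨j', h1, h2⟩
        refine ⟨j', ?_, h2⟩
        rcases eq_or_lt_of_le h1 with rfl | h
        · exfalso; omega
        · omega
    · rw [ehInner_stop n i (j+1) _ f (by simp [heq])]
      exact ⟨fun _ => ⟨j, le_refl j, heq⟩, fun _ => heq⟩
    · rw [ehInner_stop n i (j+1) _ f (by omega)]
      constructor
      · intro h; omega
      · rintro ⟨j', hjj', hj'eq⟩
        exfalso
        have : j * j ≤ j' * j' := by nlinarith
        nlinarith
-- characterisation of the outer loop
theorem ehOuter_iff (n : Int) :
    ∀ (f : Nat) (i : Int), 1 ≤ i → n - i ≤ (f : Int) →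
      (ehOuter n i f = true ↔
        ∃ i' j', i ≤ i' ∧ i' < n ∧ 1 ≤ j' ∧ i'*i' + j'*j' = n * n) := by
  intro f
  induction f with
  | zero =>
    intro i hi hf
    simp only [ehOuter]
    constructor
    · intro h; exact absurd h (by simp)
    · rintro ⟨i', j', h1, h2, _, _⟩; exfalso; omega
  | succ f ih =>
    intro i hi hf
    simp only [ehOuter]
    by_cases hin : i < n
    · rw [if_pos hin]
      have hn2 : 2 ≤ n := by omega
      have hinner := ehInner_iff n i (by omega) (n.toNat + 2) 1 0 (le_refl 1)
        (by nlinarith) (by push_cast; omega)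
      by_cases hhit : ehInner n i 1 0 (n.toNat + 2) = n * n
      · rw [if_pos hhit]
        simp only [true_iff]
        obtain ⟨j', hj1, hj2⟩ := hinner.mp hhit
        exact ⟨i, j', le_refl i, hin, hj1, hj2⟩
      · rw [if_neg hhit, ih (i+1) (by omega) (by omega)]
        constructor
        · rintro ⟨i', j', h1, h2, h3, h4⟩; exact ⟨i', j', by omega, h2, h3, h4⟩
        · rintro ⟨i', j', h1, h2, h3, h4⟩
          refine ⟨i', j', ?_, h2, h3, h4⟩
          rcases eq_or_lt_of_le h1 with rfl | h
          · exact absurd (hinner.mpr ⟨j', h3, h4⟩) hhit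
          · omega
    · rw [if_neg hin]
      constructor
      · intro h; exact absurd h (by simp)
      · rintro ⟨i', j', h1, h2, _, _⟩; exfalso; omega

-- A's primality-style test, characterised as an existential
theorem hyp_iff (n : Int) (hn : 1 ≤ n) :
    é_hipotenusa n = true ↔ ∃ i j, 1 ≤ i ∧ i < n ∧ 1 ≤ j ∧ i*i + j*j = n * n := by
  unfold é_hipotenusa
  rw [ehOuter_iff n (n.toNat + 1) 1 (le_refl 1) (by push_cast; omega)]

-- membership in B's set of squares
theorem mem_pvSquares (k x : Int) :
    PySem.Set.contains (pvSquares k) x = true ↔ ∃ j, 1 ≤ j ∧ j ≤ k ∧ j * j = x := by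
  unfold pvSquares
  rw [PySem.Set.contains_iff, PySem.Set.mem_ofList]
  simp only [List.mem_map, PySem.List.mem_pyRange_one]
  constructor
  · rintro ⟨j, ⟨h1, h2⟩, h3⟩; exact ⟨j, h1, by omega, h3⟩
  · rintro ⟨j, h1, h2, h3⟩; exact ⟨j, ⟨h1, by omega⟩, h3⟩

-- B's per-n test agrees with A's existential characterisation for 2 ≤ n ≤ k
theorem pvIsHyp_iff (k n : Int) (h2 : 2 ≤ n) (hk : n ≤ k) :
    pvIsHyp k n = true ↔ ∃ i j, 1 ≤ i ∧ i < n ∧ 1 ≤ j ∧ i*i + j*j = n * n := by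
  unfold pvIsHyp
  rw [List.any_eq_true]
  constructor
  · rintro ⟨i, hmem, hc⟩
    rw [PySem.List.mem_pyRange_one] at hmem
    obtain ⟨j, hj1, _, hj3⟩ := (mem_pvSquares k _).mp hc
    exact ⟨i, j, hmem.1, hmem.2, hj1, by omega⟩
  · rintro ⟨i, j, h1, hlt, hj1, heq⟩
    refine ⟨i, PySem.List.mem_pyRange_one.mpr ⟨h1, hlt⟩, (mem_pvSquares k _).mpr ⟨j, hj1, ?_, by omega⟩⟩
    -- j < n since j*j = n*n - i*i < n*n and j ≥ 1
    nlinarith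
-- A's sum loop is a fold over range(n, k+1)
theorem somaLoop_eq (k : Int) :
    ∀ (f : Nat) (n h : Int), k + 1 - n ≤ (f : Int) →
      somaLoop k n h f =
        (PySem.List.pyRange n (k+1) 1).foldl
          (fun acc m => if é_hipotenusa m then acc + m else acc) h := by
  intro f
  induction f with
  | zero =>
    intro n h hf
    rw [PySem.List.pyRange_one_eq_nil (by omega)]
    simp [somaLoop]
  | succ f ih =>
    intro n h hf
    by_cases hnk : n ≤ k
    · rw [PySem.List.pyRange_one_cons (by omega)]
      simp only [somaLoop, if_pos hnk, List.foldl_cons]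
      exact ih (n+1) _ (by omega)
    · rw [PySem.List.pyRange_one_eq_nil (by omega)]
      simp [somaLoop, hnk]

-- folding A's test over a list where it agrees with B's test is filter-then-sum
theorem foldl_filter_sum (k : Int) :
    ∀ (L : List Int) (h : Int), (∀ m ∈ L, é_hipotenusa m = pvIsHyp k m) →
      L.foldl (fun acc m => if é_hipotenusa m then acc + m else acc) h =
        h + (L.filter (fun n => pvIsHyp k n)).sum := by
  intro L
  induction L with
  | nil => intro h _; simp
  | cons x xs ih =>
    intro h hagree
    have hx : é_hipotenusa x = pvIsHyp k x := hagree x (by simp)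
    have hxs : ∀ m ∈ xs, é_hipotenusa m = pvIsHyp k m := fun m hm => hagree m (by simp [hm])
    simp only [List.foldl_cons, List.filter_cons]
    by_cases hb : pvIsHyp k x = true
    · rw [if_pos (hx ▸ hb), if_pos hb, ih _ hxs]
      simp; ring
    · rw [if_neg (by rw [hx]; exact hb), if_neg hb, ih _ hxs]

-- ===== VERDICT (by name: the statement is the Claim_ definition above) =====
theorem soma_hipotenusas_spec : Claim_equal_soma_hipotenusas := by
  intro k _
  unfold Spec_soma_hipotenusas soma_hipotenusas soma_hipotenusas_alt
  rw [somaLoop_eq k (k.toNat + 1) 1 0 (by push_cast; omega)]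
  by_cases hk : 1 ≤ k
  · rw [PySem.List.pyRange_one_cons (by omega), List.foldl_cons]
    have h1 : é_hipotenusa 1 = false := by decide
    rw [h1]
    simp only [Bool.false_eq_true, if_false]
    rw [foldl_filter_sum k _ 0 ?_]
    · simp
    · intro m hm
      rw [PySem.List.mem_pyRange_one] at hm
      exact Bool.eq_iff_iff.mpr ((hyp_iff m (by omega)).trans (pvIsHyp_iff k m (by omega) (by omega)).symm)
  · rw [PySem.List.pyRange_one_eq_nil (by omega), PySem.List.pyRange_one_eq_nil (by omega)]
    simp
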